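-- pv_equiv track=rewrite | github.com/JamesDYX/LeetCodeExercise | kuaishou.py | solve
-- ===== SOURCE A (Python) =====
-- def solve(n , a ):
--     # write code here
--     stack = []
--     res = 0
--     for index in range(n):
--         while len(stack) > 0:
--             if a[index] >= a[stack[-1]]:
--                 stack.pop(-1)
--             else:
--                 break
--         if len(stack) > 0:
--             res += stack[-1]+1
--         stack.append(index)
--     return res
-- ===== SOURCE B (Python) =====
-- def solve(n, a):
--     # For each index i, scan leftward for the nearest strictly greater element;
--     # add its 1-based position. No stack needed.
--     res = 0
--     for i in range(n):
--         for j in range(i - 1, -1, -1):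
--             if a[j] > a[i]:
--                 res += j + 1
--                 break
--     return res
-- ===== Notes on version B (the rewrite author's own statement) =====
-- stated objective: simpler
-- what changed: Replaced the monotonic-stack single pass with a direct nested scan: for each i, scan leftward to the first strictly greater element and add its 1-based index; no stack state at all.
import Mathlib
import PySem

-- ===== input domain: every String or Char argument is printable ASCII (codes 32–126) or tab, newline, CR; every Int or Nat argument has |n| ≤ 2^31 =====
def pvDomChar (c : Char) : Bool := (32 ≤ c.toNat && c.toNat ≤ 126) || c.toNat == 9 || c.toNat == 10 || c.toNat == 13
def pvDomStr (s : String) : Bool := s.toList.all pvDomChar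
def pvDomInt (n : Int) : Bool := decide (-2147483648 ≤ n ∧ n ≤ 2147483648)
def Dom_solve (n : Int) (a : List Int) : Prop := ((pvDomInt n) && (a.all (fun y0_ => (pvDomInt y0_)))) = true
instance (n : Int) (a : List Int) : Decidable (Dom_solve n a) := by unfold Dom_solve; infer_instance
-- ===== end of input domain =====

-- B replaces A's monotonic-stack pass by a direct quadratic leftward scan for the
-- nearest strictly greater element: simpler (no stack state), not faster.


-- ===== PORT A =====
-- A's while-pop loop; the Python stack's top (last element) is the HEAD here.
def popA (a : List Int) (x : Int) : List Int → List Int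
  | [] => []
  | t :: rest => if x ≥ PySem.List.pyGetD a t 0 then popA a x rest else t :: rest

def solve (n : Int) (a : List Int) : Int :=
  ((PySem.List.pyRange 0 n 1).foldl
    (fun (st : List Int × Int) index =>
      let stack := popA a (PySem.List.pyGetD a index 0) st.1
      let res := st.2 + (match stack with | [] => 0 | t :: _ => t + 1)
      (index :: stack, res)) ([], 0)).2

-- ===== PORT B =====
-- B's inner 'for j in range(i-1,-1,-1): … break' loop: recursion over the countdown list.
def scanB (a : List Int) (x : Int) : List Int → Int
  | [] => 0
  | j :: rest => if PySem.List.pyGetD a j 0 > x then j + 1 else scanB a x rest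

def solve_alt (n : Int) (a : List Int) : Int :=
  (PySem.List.pyRange 0 n 1).foldl
    (fun res i =>
      res + scanB a (PySem.List.pyGetD a i 0) (PySem.List.pyRange (i - 1) (-1) (-1))) 0

-- ===== PRECONDITION & SPEC =====
-- Pre_ excludes exactly the inputs where Python A raises IndexError: n > len(a).
def Pre_solve (n : Int) (a : List Int) : Prop := n ≤ (a.length : Int)
instance (n : Int) (a : List Int) : Decidable (Pre_solve n a) := by unfold Pre_solve; infer_instance
def pvWitness_solve : Int × List Int := (4, [2, 1, 3, 2])

def Spec_solve (n : Int) (a : List Int) (out : Int) : Prop := out = solve_alt n a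
instance (n : Int) (a : List Int) (out : Int) : Decidable (Spec_solve n a out) := by unfold Spec_solve; infer_instance

-- ===== CLAIM (what is proved, stated in full; the proofs are below) =====
def Claim_equal_solve : Prop := ∀ (n : Int) (a : List Int), Dom_solve n a → Pre_solve n a → Spec_solve n a (solve n a)

-- ===== LEMMAS AND PROOFS =====

-- value at a Nat index (total model; agrees with pyGetD ↑j 0)
def v (a : List Int) (j : Nat) : Int := a.getD j 0

-- Nat-level mirror of A's step
def popN (a : List Int) (x : Int) : List Nat → List Nat
  | [] => []
  | t :: rest => if x ≥ v a t then popN a x rest else t :: rest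

def topv : List Nat → Int
  | [] => 0
  | t :: _ => (t : Int) + 1

def stepN (a : List Int) (st : List Nat × Int) (k : Nat) : List Nat × Int :=
  let s := popN a (v a k) st.1
  (k :: s, st.2 + topv s)

-- Nat-level mirror of B's scan
def nbF (a : List Int) (x : Int) : Nat → Int
  | 0 => 0
  | k + 1 => if v a k > x then (k : Int) + 1 else nbF a x k

-- the stack after processing indices 0..k-1: indices j<k dominating everything to their right
abbrev Pred (a : List Int) (k j : Nat) : Prop := ∀ m, m < k → j < m → v a m < v a j

def stk (a : List Int) (k : Nat) : List Nat :=
  ((List.range k).filter (fun j => decide (Pred a k j))).reverse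

theorem popA_map (a : List Int) (x : Int) (S : List Nat) :
    popA a x (S.map (fun (t : Nat) => (t : Int))) = (popN a x S).map (fun (t : Nat) => (t : Int)) := by
  induction S with
  | nil => rfl
  | cons t rest ih =>
      rw [List.map_cons, popA, popN, PySem.List.pyGetD_natCast]
      by_cases h : x ≥ v a t
      · rw [if_pos (show x ≥ a.getD t 0 from h), if_pos h, ih]
      · rw [if_neg (show ¬ x ≥ a.getD t 0 from h), if_neg h, List.map_cons]

def stepA (a : List Int) (st : List Int × Int) (index : Int) : List Int × Int :=
  let stack := popA a (PySem.List.pyGetD a index 0) st.1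
  let res := st.2 + (match stack with | [] => 0 | t :: _ => t + 1)
  (index :: stack, res)

theorem foldA_map (a : List Int) (l : List Nat) (S : List Nat) (r : Int) :
    (l.map (fun (t : Nat) => (t : Int))).foldl (stepA a) (S.map (fun (t : Nat) => (t : Int)), r) =
      ((l.foldl (stepN a) (S, r)).1.map (fun (t : Nat) => (t : Int)), (l.foldl (stepN a) (S, r)).2) := by
  induction l generalizing S r with
  | nil => rfl
  | cons k l ih =>
      rw [List.map_cons, List.foldl_cons, List.foldl_cons]
      have hstep : stepA a (S.map (fun (t : Nat) => (t : Int)), r) ((k : Nat) : Int) =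
          ((stepN a (S, r) k).1.map (fun (t : Nat) => (t : Int)), (stepN a (S, r) k).2) := by
        have h1 : popA a ((a[k]?).getD 0) (S.map (fun (t : Nat) => (t : Int))) =
            (popN a (v a k) S).map (fun (t : Nat) => (t : Int)) := by
          exact popA_map a (a.getD k 0) S
        cases hpop : popN a (v a k) S with
        | nil => simp [stepA, stepN, h1, hpop, topv]
        | cons t rest => simp [stepA, stepN, h1, hpop, topv]
      rw [hstep, ih]

theorem solve_eq_fold (n : Int) (a : List Int) :
    solve n a = ((List.range n.toNat).foldl (stepN a) ([], 0)).2 := by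
  show ((PySem.List.pyRange 0 n 1).foldl (stepA a) ([], 0)).2 = _
  rw [PySem.List.pyRange_one]
  simp only [Int.sub_zero, zero_add]
  have := foldA_map a (List.range n.toNat) [] 0
  rw [List.map_nil] at this
  rw [this]

theorem scanB_eq_nbF (a : List Int) (x : Int) (k : Nat) :
    scanB a x (PySem.List.pyRange ((k : Int) - 1) (-1) (-1)) = nbF a x k := by
  induction k with
  | zero =>
      rw [PySem.List.pyRange_neg_one_eq_nil (by norm_num)]
      rfl
  | succ k ih =>
      have h1 : ((k : Int) + 1) - 1 = (k : Int) := by ring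
      rw [Nat.cast_add, Nat.cast_one, h1,
        PySem.List.pyRange_neg_one_cons (by omega)]
      rw [scanB, PySem.List.pyGetD_natCast]
      show (if v a k > x then (k : Int) + 1 else _) = _
      rw [nbF, ih]

theorem solve_alt_eq_fold (n : Int) (a : List Int) :
    solve_alt n a = (List.range n.toNat).foldl (fun r k => r + nbF a (v a k) k) 0 := by
  show (PySem.List.pyRange 0 n 1).foldl _ 0 = _
  rw [PySem.List.pyRange_one]
  simp only [Int.sub_zero, zero_add, List.foldl_map]
  congr 1
  funext r k
  rw [PySem.List.pyGetD_natCast, scanB_eq_nbF]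
  rfl

theorem stk_pairwise (a : List Int) (k : Nat) :
    (stk a k).Pairwise (fun s t => v a s < v a t) := by
  unfold stk
  rw [List.pairwise_reverse]
  have h1 : ((List.range k).filter (fun j => decide (Pred a k j))).Pairwise (· < ·) :=
    (List.pairwise_lt_range).filter _
  refine h1.imp_of_mem ?_
  intro s t hs ht hlt
  have hsP : Pred a k s := by
    have := (List.mem_filter.mp hs).2
    simpa using this
  have htk : t < k := by
    have := (List.mem_filter.mp ht).1
    simpa using this
  exact hsP t htk hlt

theorem popN_eq_dropWhile (a : List Int) (x : Int) (S : List Nat) :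
    popN a x S = S.dropWhile (fun t => decide (x ≥ v a t)) := by
  induction S with
  | nil => rfl
  | cons t rest ih =>
      by_cases h : x ≥ v a t
      · rw [popN, if_pos h, List.dropWhile, ih]
        simp [h]
      · rw [popN, if_neg h, List.dropWhile]
        simp [h]

theorem dropWhile_eq_filter (a : List Int) (x : Int) (S : List Nat)
    (h : S.Pairwise (fun s t => v a s < v a t)) :
    S.dropWhile (fun t => decide (x ≥ v a t)) = S.filter (fun t => decide (x < v a t)) := by
  induction S with
  | nil => rfl
  | cons t rest ih =>
      rw [List.pairwise_cons] at h
      by_cases hx : x ≥ v a t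
      · rw [List.dropWhile, List.filter]
        simp only [decide_eq_true hx, decide_eq_false (show ¬ x < v a t by omega)]
        exact ih h.2
      · rw [List.dropWhile, List.filter]
        simp only [decide_eq_false hx, decide_eq_true (show x < v a t by omega)]
        have : rest.filter (fun u => decide (x < v a u)) = rest := by
          apply List.filter_eq_self.mpr
          intro u hu
          have := h.1 u hu
          simp only [decide_eq_true_eq]
          omega
        rw [this]

theorem stack_step (a : List Int) (k : Nat) :
    popN a (v a k) (stk a k) = ((List.range k).filter (fun j => decide (Pred a (k + 1) j))).reverse := by
  rw [popN_eq_dropWhile, dropWhile_eq_filter a (v a k) _ (stk_pairwise a k)]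
  unfold stk
  rw [List.filter_reverse, List.filter_filter]
  congr 1
  apply List.filter_congr
  intro j hj
  have hjk : j < k := List.mem_range.mp hj
  rw [← Bool.decide_and, decide_eq_decide]
  constructor
  · rintro ⟨hlt, hP⟩ m hm1 hm2
    by_cases hm : m = k
    · subst hm; exact hlt
    · exact hP m (by omega) hm2
  · intro hP
    exact ⟨hP k (by omega) hjk, fun m hm1 hm2 => hP m (by omega) hm2⟩

theorem nbF_of_none (a : List Int) (x : Int) (k : Nat) (h : ∀ j, j < k → v a j ≤ x) :
    nbF a x k = 0 := by
  induction k with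
  | zero => rfl
  | succ k ih =>
      simp only [nbF]
      rw [if_neg (by have := h k (by omega); omega)]
      exact ih (fun j hj => h j (by omega))

theorem nbF_of_hit (a : List Int) (x : Int) (k j0 : Nat) (h0 : j0 < k) (hx : x < v a j0)
    (hm : ∀ m, j0 < m → m < k → v a m ≤ x) : nbF a x k = (j0 : Int) + 1 := by
  induction k with
  | zero => omega
  | succ k ih =>
      simp only [nbF]
      by_cases hk : j0 = k
      · subst hk; rw [if_pos (by omega)]
      · rw [if_neg (by have := hm k (by omega) (by omega); omega)]
        exact ih (by omega) (fun m h1 h2 => hm m h1 (by omega))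

-- the greatest j < k with v a j > v a k satisfies Pred a (k+1)
theorem findGreatest_pred (a : List Int) (k j : Nat) (hj : j < k) (hv : v a k < v a j) :
    let j0 := Nat.findGreatest (fun j => v a k < v a j) k
    j ≤ j0 ∧ j0 < k ∧ j0 ∈ (List.range k).filter (fun j => decide (Pred a (k + 1) j)) := by
  intro j0
  have hPj0 : v a k < v a j0 :=
    Nat.findGreatest_spec (P := fun j => v a k < v a j) (n := k) (m := j) (by omega) hv
  have hle : j ≤ j0 := Nat.le_findGreatest (by omega) hv
  have hj0k : j0 ≤ k := Nat.findGreatest_le k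
  have hj0k' : j0 < k := by
    rcases Nat.lt_or_ge j0 k with h | h
    · exact h
    · exfalso; have : j0 = k := by omega
      rw [this] at hPj0; omega
  refine ⟨hle, hj0k', List.mem_filter.mpr ⟨List.mem_range.mpr hj0k', ?_⟩⟩
  simp only [decide_eq_true_eq]
  intro m hm1 hm2
  by_cases hm : m = k
  · subst hm; exact hPj0
  · have : ¬ v a k < v a m := Nat.findGreatest_is_greatest hm2 (by omega)
    omega

theorem top_step (a : List Int) (k : Nat) :
    topv (((List.range k).filter (fun j => decide (Pred a (k + 1) j))).reverse) = nbF a (v a k) k := by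
  cases hF : ((List.range k).filter (fun j => decide (Pred a (k + 1) j))).reverse with
  | nil =>
      show (0 : Int) = _
      symm
      apply nbF_of_none
      intro j hj
      by_contra hc
      have := findGreatest_pred a k j hj (by omega)
      have hmem := this.2.2
      rw [← List.reverse_reverse ((List.range k).filter _), hF] at hmem
      simp at hmem
  | cons j0 tail =>
      have hj0mem : j0 ∈ (List.range k).filter (fun j => decide (Pred a (k + 1) j)) := by
        rw [← List.reverse_reverse ((List.range k).filter _), hF]
        simp
      have hj0k : j0 < k := by
        have := (List.mem_filter.mp hj0mem).1; simpa using this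
      have hj0P : Pred a (k + 1) j0 := by
        have := (List.mem_filter.mp hj0mem).2; simpa using this
      have hFeq : (List.range k).filter (fun j => decide (Pred a (k + 1) j)) = tail.reverse ++ [j0] := by
        rw [← List.reverse_reverse ((List.range k).filter _), hF, List.reverse_cons]
      have hmax : ∀ e ∈ (List.range k).filter (fun j => decide (Pred a (k + 1) j)), e ≤ j0 := by
        have hpw : ((List.range k).filter (fun j => decide (Pred a (k + 1) j))).Pairwise (· < ·) :=
          (List.pairwise_lt_range).filter _
        rw [hFeq] at hpw ⊢
        intro e he
        rcases List.mem_append.mp he with h | h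
        · have := (List.pairwise_append.mp hpw).2.2 e h j0 (by simp)
          omega
        · simp at h; omega
      show (j0 : Int) + 1 = _
      symm
      apply nbF_of_hit a (v a k) k j0 hj0k (hj0P k (by omega) hj0k)
      intro m hm1 hm2
      by_contra hc
      obtain ⟨hle, _, hmem⟩ := findGreatest_pred a k m hm2 (by omega)
      have := hmax _ hmem
      omega

theorem master (a : List Int) (k : Nat) :
    (List.range k).foldl (stepN a) ([], 0) =
      (stk a k, (List.range k).foldl (fun r i => r + nbF a (v a i) i) 0) := by
  induction k with
  | zero => rfl
  | succ k ih =>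
      rw [List.range_succ, List.foldl_append, List.foldl_append, ih]
      show (k :: popN a (v a k) (stk a k),
        (List.range k).foldl (fun r i => r + nbF a (v a i) i) 0 + topv (popN a (v a k) (stk a k))) = _
      rw [stack_step, top_step]
      have hstk : stk a (k + 1) =
          k :: ((List.range k).filter (fun j => decide (Pred a (k + 1) j))).reverse := by
        unfold stk
        rw [List.range_succ, List.filter_append]
        have : [k].filter (fun j => decide (Pred a (k + 1) j)) = [k] := by
          simp only [List.filter_cons, List.filter_nil]
          rw [if_pos]
          simp only [decide_eq_true_eq]
          intro m hm1 hm2; omega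
        rw [this, List.reverse_append]
        rfl
      rw [hstk]
      rfl

-- ===== VERDICT (by name: the statement is the Claim_ definition above) =====
theorem solve_spec : Claim_equal_solve := by
  intro n a _ _
  unfold Spec_solve
  rw [solve_eq_fold, solve_alt_eq_fold, master]
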